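-- pv_equiv track=rewrite | github.com/chenqianwan/UIST1 | python/semantic_embed_server.py | _ordered_clause_ids
-- ===== SOURCE A (Python) =====
-- from typing import Any, Dict, List, Literal, Optional, Tuple
--
-- def _ordered_clause_ids(nodes_by_id: Dict[str, Dict[str, Any]], children: Dict[str, List[str]]) -> List[str]:
--     ordered: List[str] = []
--     visited: set[str] = set()
--
--     def dfs(nid: str):
--         if nid in visited:
--             return
--         visited.add(nid)
--         if nid != "root":
--             ordered.append(nid)
--         for child in children.get(nid, []):
--             if child == nid:
--                 continue
--             if child in nodes_by_id:
--                 dfs(child)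
--
--     for rid in children.get("root", []):
--         if rid in nodes_by_id:
--             dfs(rid)
--
--     for rid in children.get("__TOP__", []):
--         if rid in nodes_by_id and rid != "root":
--             dfs(rid)
--
--     for nid in list(nodes_by_id.keys()):
--         if nid != "root":
--             dfs(nid)
--
--     return ordered
-- ===== SOURCE B (Python) =====
-- def _ordered_clause_ids(nodes_by_id, children):
--     ordered = []
--     visited = set()
--
--     def run(seed):
--         stack = [seed]
--         while stack:
--             nid = stack.pop()
--             if nid in visited:
--                 continue
--             visited.add(nid)
--             if nid != "root":
--                 ordered.append(nid)
--             kids = [c for c in children.get(nid, []) if c != nid and c in nodes_by_id]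
--             stack.extend(reversed(kids))
--
--     for rid in children.get("root", []):
--         if rid in nodes_by_id:
--             run(rid)
--
--     for rid in children.get("__TOP__", []):
--         if rid in nodes_by_id and rid != "root":
--             run(rid)
--
--     for nid in nodes_by_id:
--         if nid != "root":
--             run(nid)
--
--     return ordered
-- ===== Notes on version B (the rewrite author's own statement) =====
-- stated objective: alternative
-- what changed: The recursive DFS closure is replaced by an iterative explicit-stack loop (mark-on-pop, children filtered once and pushed in reversed order), removing recursion entirely while keeping the same pre-order output.
import Mathlib
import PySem

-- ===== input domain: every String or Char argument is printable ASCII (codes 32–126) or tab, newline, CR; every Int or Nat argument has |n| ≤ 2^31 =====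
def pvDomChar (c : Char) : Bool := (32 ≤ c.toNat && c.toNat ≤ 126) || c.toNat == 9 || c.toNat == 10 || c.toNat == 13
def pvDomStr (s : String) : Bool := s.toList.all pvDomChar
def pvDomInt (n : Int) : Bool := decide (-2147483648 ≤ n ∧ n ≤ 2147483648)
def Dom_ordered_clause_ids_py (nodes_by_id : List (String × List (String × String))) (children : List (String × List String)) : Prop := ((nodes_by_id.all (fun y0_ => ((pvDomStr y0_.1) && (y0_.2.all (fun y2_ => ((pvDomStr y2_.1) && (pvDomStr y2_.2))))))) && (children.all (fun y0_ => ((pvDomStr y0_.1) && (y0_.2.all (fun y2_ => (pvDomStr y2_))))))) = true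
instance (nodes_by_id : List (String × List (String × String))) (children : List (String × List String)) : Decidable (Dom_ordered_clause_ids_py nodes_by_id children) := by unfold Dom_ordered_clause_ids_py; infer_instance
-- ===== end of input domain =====

-- B replaces the recursive DFS closure by an iterative explicit-stack loop with the same pre-order output; A's port carries a fuel guard (nodes length + 1, always sufficient) only to make the recursion total.

-- ===== PORT A =====
-- A's recursive dfs; state = (visited, ordered); fuel only makes the recursion total
def pvDfsA (nodes : PySem.Dict String (List (String × String))) (children : PySem.Dict String (List String)) :
    Nat → String → PySem.Set String × List String → PySem.Set String × List String
  | 0, _, s => s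
  | f + 1, nid, (visited, ordered) =>
    if PySem.Set.contains visited nid then (visited, ordered)
    else
      let visited' := PySem.Set.add visited nid
      let ordered' := if nid ≠ "root" then ordered ++ [nid] else ordered
      (children.getD nid []).foldl
        (fun s child =>
          if child == nid then s
          else if nodes.contains child then pvDfsA nodes children f child s
          else s)
        (visited', ordered')

def ordered_clause_ids_py (nodes_by_id : List (String × List (String × String))) (children : List (String × List String)) : List String :=
  let nodes := PySem.Dict.mk nodes_by_id
  let ch := PySem.Dict.mk children
  let F := nodes_by_id.length + 1
  let s0 : PySem.Set String × List String := (PySem.Set.empty, [])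
  let s1 := (ch.getD "root" []).foldl (fun s rid => if nodes.contains rid then pvDfsA nodes ch F rid s else s) s0
  let s2 := (ch.getD "__TOP__" []).foldl (fun s rid => if nodes.contains rid && rid != "root" then pvDfsA nodes ch F rid s else s) s1
  let s3 := nodes.keys.foldl (fun s nid => if nid != "root" then pvDfsA nodes ch F nid s else s) s2
  s3.2

-- ===== PORT B =====
-- Source B's list comprehension: the eligible children of nid, filtered once
def pvKids (nodes : PySem.Dict String (List (String × String))) (children : PySem.Dict String (List String)) (nid : String) : List String :=
  (children.getD nid []).filter (fun c => c != nid && nodes.contains c)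

-- Source B's while-stack loop: pop (head), skip if visited, mark, append, push reversed kids
def pvRun (nodes : PySem.Dict String (List (String × String))) (children : PySem.Dict String (List String)) :
    List String → PySem.Set String → List String → PySem.Set String × List String
  | [], visited, ordered => (visited, ordered)
  | nid :: st, visited, ordered =>
    if PySem.Set.contains visited nid then pvRun nodes children st visited ordered
    else
      pvRun nodes children
        ((pvKids nodes children nid).reverse.foldl (fun acc c => c :: acc) st)
        (PySem.Set.add visited nid)
        (if nid ≠ "root" then ordered ++ [nid] else ordered)
  termination_by stack visited _ =>
    (((nodes.keys ++ stack).toFinset.filter (fun x => x ∉ visited)).card, stack.length)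
  decreasing_by
    · simp_wf
      have hsub : ({x ∈ nodes.keys.toFinset ∪ st.toFinset | x ∉ visited} : Finset String)
          ⊆ {x ∈ insert nid (nodes.keys.toFinset ∪ st.toFinset) | x ∉ visited} := by
        intro x hx
        simp only [Finset.mem_filter, Finset.mem_insert] at *
        tauto
      rcases lt_or_eq_of_le (Finset.card_le_card hsub) with hlt | heq
      · exact Prod.Lex.left _ _ hlt
      · rw [heq]
        exact Prod.Lex.right _ (Nat.lt_succ_self _)
    · rename_i h
      simp_wf
      apply Prod.Lex.left
      apply Finset.card_lt_card
      rw [Finset.ssubset_iff_of_subset]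
      · refine ⟨nid, ?_, ?_⟩
        · simp only [Finset.mem_filter, Finset.mem_insert]
          exact ⟨by simp, by simpa using h⟩
        · simp
      · intro x hx
        simp only [Finset.mem_filter, Finset.mem_union, Finset.mem_insert, List.mem_toFinset] at *
        obtain ⟨hin, hnv, -⟩ := hx
        refine ⟨?_, hnv⟩
        rcases hin with hk | hk | hk
        · exact Or.inr (Or.inl (by simpa using hk))
        · have : nodes.contains x = true := by
            have := (List.mem_filter.mp hk).2
            simp only [Bool.and_eq_true] at this
            exact this.2
          exact Or.inr (Or.inl (by simpa using (PySem.Dict.contains_iff_mem_keys _ _).mp this))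
        · exact Or.inr (Or.inr (by simpa using hk))

def ordered_clause_ids_py_alt (nodes_by_id : List (String × List (String × String))) (children : List (String × List String)) : List String :=
  let nodes := PySem.Dict.mk nodes_by_id
  let ch := PySem.Dict.mk children
  let s0 : PySem.Set String × List String := (PySem.Set.empty, [])
  let s1 := (ch.getD "root" []).foldl (fun s rid => if nodes.contains rid then pvRun nodes ch [rid] s.1 s.2 else s) s0
  let s2 := (ch.getD "__TOP__" []).foldl (fun s rid => if nodes.contains rid && rid != "root" then pvRun nodes ch [rid] s.1 s.2 else s) s1
  let s3 := nodes.keys.foldl (fun s nid => if nid != "root" then pvRun nodes ch [nid] s.1 s.2 else s) s2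
  s3.2

-- ===== PRECONDITION & SPEC =====
def Spec_ordered_clause_ids_py (nodes_by_id : List (String × List (String × String))) (children : List (String × List String)) (out : List String) : Prop := out = ordered_clause_ids_py_alt nodes_by_id children
instance (nodes_by_id : List (String × List (String × String))) (children : List (String × List String)) (out : List String) : Decidable (Spec_ordered_clause_ids_py nodes_by_id children out) := by unfold Spec_ordered_clause_ids_py; infer_instance

-- ===== CLAIM (what is proved, stated in full; the proofs are below) =====
def Claim_equal_ordered_clause_ids_py : Prop := ∀ (nodes_by_id : List (String × List (String × String))) (children : List (String × List String)), Dom_ordered_clause_ids_py nodes_by_id children → Spec_ordered_clause_ids_py nodes_by_id children (ordered_clause_ids_py nodes_by_id children)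

-- ===== LEMMAS AND PROOFS =====

-- number of keys not yet visited
def pvMu (nodes : PySem.Dict String (List (String × String))) (v : PySem.Set String) : Nat :=
  (nodes.keys.toFinset.filter (fun x => x ∉ v)).card

lemma pv_foldl_pres {α σ : Type} (P : σ → Prop) (body : σ → α → σ)
    (h : ∀ s a, P s → P (body s a)) : ∀ (l : List α) (s : σ), P s → P (l.foldl body s) := by
  intro l
  induction l with
  | nil => intro s hs; simpa using hs
  | cons a t ih => intro s hs; exact ih _ (h _ _ hs)

lemma pvDfsA_mono (nodes : PySem.Dict String (List (String × String))) (ch : PySem.Dict String (List String)) :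
    ∀ (f : Nat) (nid : String) (s : PySem.Set String × List String) (x : String),
      x ∈ s.1 → x ∈ (pvDfsA nodes ch f nid s).1 := by
  intro f
  induction f with
  | zero => intro nid s x hx; simpa [pvDfsA] using hx
  | succ f ih =>
    intro nid s x hx
    obtain ⟨v, o⟩ := s
    simp only [pvDfsA]
    split
    · exact hx
    · refine pv_foldl_pres (fun (s : PySem.Set String × List String) => x ∈ s.1) _ ?_ _ _ ?_
      · intro s a hs
        dsimp only
        split
        · exact hs
        · split
          · exact ih _ _ _ hs
          · exact hs
      · simp only [PySem.Set.mem_add]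
        exact Or.inl hx

lemma pvList_mono (nodes : PySem.Dict String (List (String × String))) (ch : PySem.Dict String (List String))
    (f : Nat) (l : List String) (s : PySem.Set String × List String) (x : String) (hx : x ∈ s.1) :
    x ∈ (l.foldl (fun s n => pvDfsA nodes ch f n s) s).1 :=
  pv_foldl_pres (fun s => x ∈ s.1) _ (fun s a hs => pvDfsA_mono nodes ch f a s x hs) l s hx

lemma pvMu_le_of_subset (nodes : PySem.Dict String (List (String × String))) (v v' : PySem.Set String)
    (h : ∀ x, x ∈ v → x ∈ v') : pvMu nodes v' ≤ pvMu nodes v := by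
  apply Finset.card_le_card
  intro x hx
  simp only [Finset.mem_filter] at *
  exact ⟨hx.1, fun hc => hx.2 (h x hc)⟩

lemma pvMu_le (nodes : PySem.Dict String (List (String × String))) (v : PySem.Set String) :
    pvMu nodes v ≤ nodes.keys.length :=
  le_trans (Finset.card_le_card (Finset.filter_subset _ _)) (List.toFinset_card_le _)

lemma pvMu_add_lt (nodes : PySem.Dict String (List (String × String))) (v : PySem.Set String) (nid : String)
    (hk : nid ∈ nodes.keys) (hv : nid ∉ v) : pvMu nodes (PySem.Set.add v nid) < pvMu nodes v := by
  apply Finset.card_lt_card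
  rw [Finset.ssubset_iff_of_subset]
  · exact ⟨nid, by simp [hk, hv], by simp [PySem.Set.mem_add]⟩
  · intro x hx
    simp only [Finset.mem_filter, PySem.Set.mem_add] at *
    exact ⟨hx.1, fun hc => hx.2 (Or.inl hc)⟩

lemma pv_rev_push {α : Type} : ∀ (l st : List α), l.foldl (fun acc c => c :: acc) st = l.reverse ++ st := by
  intro l
  induction l with
  | nil => intro st; simp
  | cons a t ih => intro st; simp [List.foldl_cons, ih]

lemma pvFold_guard (nodes : PySem.Dict String (List (String × String))) (ch : PySem.Dict String (List String))
    (f : Nat) (nid : String) (l : List String) (s : PySem.Set String × List String) :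
    l.foldl (fun s child => if child == nid then s else if nodes.contains child then pvDfsA nodes ch f child s else s) s
      = (l.filter (fun c => c != nid && nodes.contains c)).foldl (fun s n => pvDfsA nodes ch f n s) s := by
  rw [← PySem.List.foldl_if_eq_foldl_filter]
  apply PySem.List.foldl_congr_mem
  intro acc x _
  cases h1 : x == nid <;> cases h2 : nodes.contains x <;>
    simp only [bne, h1, h2, Bool.not_true, Bool.not_false, Bool.true_and, Bool.false_and,
      Bool.false_eq_true, if_true, if_false, ite_false, ite_true]


lemma pvMain (nodes : PySem.Dict String (List (String × String))) (ch : PySem.Dict String (List String)) :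
    ∀ (m : Nat) (v : PySem.Set String), pvMu nodes v ≤ m →
    ∀ (st1 : List String), (∀ x ∈ st1, nodes.contains x = true) →
    ∀ (f : Nat), pvMu nodes v + 1 ≤ f →
    ∀ (st2 o : List String),
      pvRun nodes ch (st1 ++ st2) v o
        = pvRun nodes ch st2 (st1.foldl (fun s n => pvDfsA nodes ch f n s) (v, o)).1
            (st1.foldl (fun s n => pvDfsA nodes ch f n s) (v, o)).2 := by
  intro m
  induction m using Nat.strong_induction_on with
  | _ m IH =>
  intro v hv st1
  induction st1 with
  | nil =>
    intro _ f hf st2 o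
    simp [List.foldl]
  | cons n rest ih =>
    intro h1 f hf st2 o
    have hn : nodes.contains n = true := h1 n (by simp)
    have h1' : ∀ x ∈ rest, nodes.contains x = true := fun x hx => h1 x (by simp [hx])
    obtain ⟨f', rfl⟩ : ∃ f', f = f' + 1 := ⟨f - 1, by omega⟩
    by_cases hvis : PySem.Set.contains v n = true
    · have hmem : n ∈ v := by simpa using hvis
      have hA : pvDfsA nodes ch (f' + 1) n (v, o) = (v, o) := by
        simp only [pvDfsA]
        rw [if_pos hvis]
      have hL : pvRun nodes ch ((n :: rest) ++ st2) v o = pvRun nodes ch (rest ++ st2) v o := by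
        simp only [List.cons_append]
        rw [pvRun]
        rw [if_pos hvis]
      rw [hL, List.foldl_cons, hA]
      exact ih h1' (f' + 1) hf st2 o
    · have hnv : n ∉ v := by
        simpa using hvis
      have hkey : n ∈ nodes.keys := (PySem.Dict.contains_iff_mem_keys _ _).mp hn
      have hμlt : pvMu nodes (PySem.Set.add v n) < pvMu nodes v := pvMu_add_lt nodes v n hkey hnv
      have hkids : ∀ x ∈ pvKids nodes ch n, nodes.contains x = true := by
        intro x hx
        have := (List.mem_filter.mp hx).2
        simp only [Bool.and_eq_true] at this
        exact this.2
      have step1 := IH (pvMu nodes (PySem.Set.add v n)) (by omega)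
        (PySem.Set.add v n) le_rfl (pvKids nodes ch n) hkids f' (by omega) (rest ++ st2)
        (if n ≠ "root" then o ++ [n] else o)
      have hsub : ∀ x, x ∈ PySem.Set.add v n →
          x ∈ ((pvKids nodes ch n).foldl (fun s n => pvDfsA nodes ch f' n s)
                (PySem.Set.add v n, if n ≠ "root" then o ++ [n] else o)).1 :=
        fun x hx => pvList_mono nodes ch f' _ _ x hx
      have hμS : pvMu nodes ((pvKids nodes ch n).foldl (fun s n => pvDfsA nodes ch f' n s)
            (PySem.Set.add v n, if n ≠ "root" then o ++ [n] else o)).1 ≤ pvMu nodes (PySem.Set.add v n) :=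
        pvMu_le_of_subset nodes _ _ hsub
      have step2 := IH (pvMu nodes ((pvKids nodes ch n).foldl (fun s n => pvDfsA nodes ch f' n s)
            (PySem.Set.add v n, if n ≠ "root" then o ++ [n] else o)).1) (by omega)
        _ le_rfl rest h1' (f' + 1) (by omega) st2
        ((pvKids nodes ch n).foldl (fun s n => pvDfsA nodes ch f' n s)
            (PySem.Set.add v n, if n ≠ "root" then o ++ [n] else o)).2
      have hA : pvDfsA nodes ch (f' + 1) n (v, o)
          = (pvKids nodes ch n).foldl (fun s n => pvDfsA nodes ch f' n s)
              (PySem.Set.add v n, if n ≠ "root" then o ++ [n] else o) := by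
        simp only [pvDfsA]
        rw [if_neg hvis, pvFold_guard]
        rfl
      have hstep : pvRun nodes ch ((n :: rest) ++ st2) v o
          = pvRun nodes ch (pvKids nodes ch n ++ (rest ++ st2)) (PySem.Set.add v n)
              (if n ≠ "root" then o ++ [n] else o) := by
        simp only [List.cons_append]
        rw [pvRun]
        rw [if_neg hvis, pv_rev_push, List.reverse_reverse]
      rw [hstep, step1, List.foldl_cons, hA]
      simpa using step2

theorem ordered_clause_ids_py_spec : Claim_equal_ordered_clause_ids_py := by
  intro nodes_by_id children _
  unfold Spec_ordered_clause_ids_py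
  simp only [ordered_clause_ids_py, ordered_clause_ids_py_alt]
  have hlen : (PySem.Dict.mk nodes_by_id).keys.length = nodes_by_id.length := by
    simp [PySem.Dict.keys]
  have hone : ∀ (v : PySem.Set String) (o : List String) (seed : String),
      (PySem.Dict.mk nodes_by_id).contains seed = true →
      pvRun (PySem.Dict.mk nodes_by_id) (PySem.Dict.mk children) [seed] v o
        = pvDfsA (PySem.Dict.mk nodes_by_id) (PySem.Dict.mk children) (nodes_by_id.length + 1) seed (v, o) := by
    intro v o seed hs
    have hf : pvMu (PySem.Dict.mk nodes_by_id) v + 1 ≤ nodes_by_id.length + 1 := by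
      have := pvMu_le (PySem.Dict.mk nodes_by_id) v
      omega
    have := pvMain (PySem.Dict.mk nodes_by_id) (PySem.Dict.mk children)
      (pvMu (PySem.Dict.mk nodes_by_id) v) v le_rfl [seed] (by simpa using hs)
      (nodes_by_id.length + 1) hf [] o
    simpa [pvRun] using this
  have e1 : ∀ (l : List String) (s : PySem.Set String × List String),
      l.foldl (fun s rid => if (PySem.Dict.mk nodes_by_id).contains rid then
          pvRun (PySem.Dict.mk nodes_by_id) (PySem.Dict.mk children) [rid] s.1 s.2 else s) s
        = l.foldl (fun s rid => if (PySem.Dict.mk nodes_by_id).contains rid then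
            pvDfsA (PySem.Dict.mk nodes_by_id) (PySem.Dict.mk children) (nodes_by_id.length + 1) rid s else s) s := by
    intro l s
    apply PySem.List.foldl_congr_mem
    intro acc x _
    by_cases hx : (PySem.Dict.mk nodes_by_id).contains x = true
    · rw [if_pos hx, if_pos hx, hone acc.1 acc.2 x hx]
    · rw [if_neg hx, if_neg hx]
  have e2 : ∀ (l : List String) (s : PySem.Set String × List String),
      l.foldl (fun s rid => if (PySem.Dict.mk nodes_by_id).contains rid && rid != "root" then
          pvRun (PySem.Dict.mk nodes_by_id) (PySem.Dict.mk children) [rid] s.1 s.2 else s) s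
        = l.foldl (fun s rid => if (PySem.Dict.mk nodes_by_id).contains rid && rid != "root" then
            pvDfsA (PySem.Dict.mk nodes_by_id) (PySem.Dict.mk children) (nodes_by_id.length + 1) rid s else s) s := by
    intro l s
    apply PySem.List.foldl_congr_mem
    intro acc x _
    by_cases hx : ((PySem.Dict.mk nodes_by_id).contains x && x != "root") = true
    · have hc : (PySem.Dict.mk nodes_by_id).contains x = true := by
        simp only [Bool.and_eq_true] at hx
        exact hx.1
      rw [if_pos hx, if_pos hx, hone acc.1 acc.2 x hc]
    · rw [if_neg hx, if_neg hx]
  have e3 : ∀ (s : PySem.Set String × List String),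
      (PySem.Dict.mk nodes_by_id).keys.foldl (fun s nid => if nid != "root" then
          pvRun (PySem.Dict.mk nodes_by_id) (PySem.Dict.mk children) [nid] s.1 s.2 else s) s
        = (PySem.Dict.mk nodes_by_id).keys.foldl (fun s nid => if nid != "root" then
            pvDfsA (PySem.Dict.mk nodes_by_id) (PySem.Dict.mk children) (nodes_by_id.length + 1) nid s else s) s := by
    intro s
    apply PySem.List.foldl_congr_mem
    intro acc x hxmem
    have hc : (PySem.Dict.mk nodes_by_id).contains x = true :=
      (PySem.Dict.contains_iff_mem_keys _ _).mpr hxmem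
    by_cases hx : (x != "root") = true
    · rw [if_pos hx, if_pos hx, hone acc.1 acc.2 x hc]
    · rw [if_neg hx, if_neg hx]
  rw [e1, e2, e3]
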